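-- pv_equiv track=rewrite | github.com/wangpatrick57/leetcode | contest211/lex.py | find_all_possible_transforms
-- ===== SOURCE A (Python) =====
-- def find_all_possible_transforms(n: int, base: int) -> [int]:
--     found_transforms = []
--     curr_transform = 0
--
--     for _ in range(base):
--         if curr_transform in found_transforms:
--             break
--
--         found_transforms.append(curr_transform)
--         curr_transform = (curr_transform + n) % base
--
--     return found_transforms
-- ===== SOURCE B (Python) =====
-- def _gcd(a, b):
--     a, b = abs(a), abs(b)
--     while b:
--         a, b = b, a % b
--     return a
--
--
-- def find_all_possible_transforms(n: int, base: int) -> [int]: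
--     if base <= 0:
--         return []
--     length = base // _gcd(n, base)
--     return [(i * n) % base for i in range(length)]
-- ===== Notes on version B (the rewrite author's own statement) =====
-- stated objective: alternative
-- what changed: B computes the cycle length base // gcd(n, base) by number theory and builds the list [(i*n) % base for i in range(length)] directly, instead of A's run-time detection of the first repeated value via a membership test and break.
import Mathlib
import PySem

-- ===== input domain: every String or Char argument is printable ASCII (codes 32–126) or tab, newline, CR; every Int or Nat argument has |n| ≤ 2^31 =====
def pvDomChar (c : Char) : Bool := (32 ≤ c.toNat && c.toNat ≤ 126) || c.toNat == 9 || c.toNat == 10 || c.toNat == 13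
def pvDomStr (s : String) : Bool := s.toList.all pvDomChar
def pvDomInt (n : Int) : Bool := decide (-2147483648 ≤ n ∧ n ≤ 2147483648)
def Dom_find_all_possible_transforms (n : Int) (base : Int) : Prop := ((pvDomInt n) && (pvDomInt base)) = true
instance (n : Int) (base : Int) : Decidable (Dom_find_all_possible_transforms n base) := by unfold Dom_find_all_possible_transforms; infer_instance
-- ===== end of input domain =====

-- B replaces A's run-time repeat detection by the closed-form cycle length base // gcd(n, base)
-- (objective: alternative — the per-step membership scan disappears).

-- ===== PORT A =====
-- the for-loop over range(base) with break on a repeated value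
def pvGoA (n base : Int) : Nat → List Int → Int → List Int
  | 0, found, _ => found
  | k + 1, found, curr =>
      if curr ∈ found then found
      else pvGoA n base k (found ++ [curr]) (PySem.Int.mod (curr + n) base)

def find_all_possible_transforms (n : Int) (base : Int) : List Int :=
  pvGoA n base base.toNat [] 0

-- ===== PORT B =====
-- port of Source B's hand-written Euclid `_gcd` (abs of both, then while b: a, b = b, a % b)
def pvGcdB : Nat → Nat → Nat
  | a, 0 => a
  | a, b + 1 => pvGcdB (b + 1) (a % (b + 1))
decreasing_by exact Nat.mod_lt _ (Nat.succ_pos b)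

def find_all_possible_transforms_alt (n : Int) (base : Int) : List Int :=
  if base ≤ 0 then []
  else
    let g : Int := (pvGcdB n.natAbs base.natAbs : Int)
    let length := PySem.Int.floordiv base g
    (PySem.List.pyRange 0 length 1).map (fun i => PySem.Int.mod (i * n) base)

-- ===== PRECONDITION & SPEC =====
def Spec_find_all_possible_transforms (n : Int) (base : Int) (out : List Int) : Prop := out = find_all_possible_transforms_alt n base
instance (n : Int) (base : Int) (out : List Int) : Decidable (Spec_find_all_possible_transforms n base out) := by unfold Spec_find_all_possible_transforms; infer_instance

-- ===== CLAIM (what is proved, stated in full; the proofs are below) =====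
def Claim_equal_find_all_possible_transforms : Prop := ∀ (n : Int) (base : Int), Dom_find_all_possible_transforms n base → Spec_find_all_possible_transforms n base (find_all_possible_transforms n base)

-- ===== LEMMAS AND PROOFS =====

-- Source B's _gcd is Nat.gcd with swapped arguments
theorem pvGcdB_eq_gcd (b : Nat) : ∀ a : Nat, pvGcdB a b = Nat.gcd b a := by
  induction b using Nat.strong_induction_on with
  | _ b ih =>
    intro a
    cases b with
    | zero => simp [pvGcdB]
    | succ b =>
      rw [pvGcdB, ih (a % (b + 1)) (Nat.mod_lt _ (Nat.succ_pos b))]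
      conv_rhs => rw [Nat.gcd_rec]

-- the i-th value of the loop and the list of the first i values
def pvC (n base : Int) (i : Nat) : Int := ((i : Int) * n) % base
def pvF (n base : Int) (i : Nat) : List Int := (List.range i).map (pvC n base)

theorem pvF_succ (n base : Int) (i : Nat) :
    pvF n base (i + 1) = pvF n base i ++ [pvC n base i] := by
  simp [pvF, List.range_succ]

theorem pvC_zero (n base : Int) : pvC n base 0 = 0 := by
  simp [pvC]

theorem pvC_step (n base : Int) (i : Nat) :
    (pvC n base i + n) % base = pvC n base (i + 1) := by
  unfold pvC
  have h : ((i + 1 : Nat) : Int) * n = (i : Int) * n + n := by push_cast; ring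
  rw [h, Int.add_emod ((i : Int) * n) n, Int.add_emod ((i : Int) * n % base) n,
    Int.emod_emod_of_dvd _ dvd_rfl]

-- distinctness: the first b/g values are pairwise distinct
theorem pvC_ne (n base : Int) (b m g : Nat) (hb : base = (b : Int)) (hbpos : 0 < b)
    (hm : m = n.natAbs) (hg : g = Nat.gcd m b) {i j : Nat}
    (hji : j < i) (hi : i < b / g) :
    pvC n base j ≠ pvC n base i := by
  intro h
  have hgpos : 0 < g := hg ▸ Nat.gcd_pos_of_pos_right _ hbpos
  set d := i - j with hddef
  have hdvd : base ∣ (d : Int) * n := by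
    have h2 : base ∣ (i : Int) * n - (j : Int) * n := Int.ModEq.dvd h
    have h3 : (i : Int) * n - (j : Int) * n = (d : Int) * n := by
      rw [hddef]; push_cast [Nat.cast_sub hji.le]; ring
    rwa [h3] at h2
  have hnat : b ∣ d * m := by
    have := Int.natAbs_dvd_natAbs.mpr hdvd
    simpa [Int.natAbs_mul, hb, hm] using this
  have hgb : g ∣ b := hg ▸ Nat.gcd_dvd_right _ _
  have hgm : g ∣ m := hg ▸ Nat.gcd_dvd_left _ _
  have hdvd2 : (b / g) ∣ d * (m / g) := by
    have h1 : d * m = g * (d * (m / g)) := by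
      conv_lhs => rw [← Nat.mul_div_cancel' hgm]
      ring
    have h2 : g * (b / g) ∣ g * (d * (m / g)) := by
      rw [Nat.mul_div_cancel' hgb, ← h1]; exact hnat
    exact (Nat.mul_dvd_mul_iff_left hgpos).mp h2
  have hcop : Nat.Coprime (b / g) (m / g) := by
    have h := Nat.coprime_div_gcd_div_gcd (m := m) (n := b) (hg ▸ hgpos)
    rw [← hg] at h
    exact h.symm
  have hdvd3 : (b / g) ∣ d := hcop.dvd_of_dvd_mul_right hdvd2
  have hle := Nat.le_of_dvd (by omega) hdvd3
  omega

theorem pvC_not_mem (n base : Int) (b m g : Nat) (hb : base = (b : Int)) (hbpos : 0 < b)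
    (hm : m = n.natAbs) (hg : g = Nat.gcd m b) {i : Nat} (hi : i < b / g) :
    pvC n base i ∉ pvF n base i := by
  intro hmem
  simp only [pvF, List.mem_map, List.mem_range] at hmem
  obtain ⟨j, hj, hje⟩ := hmem
  exact pvC_ne n base b m g hb hbpos hm hg hj hi hje

-- the (b/g)-th value is 0 again
theorem pvC_L (n base : Int) (b m g : Nat) (hb : base = (b : Int))
    (hm : m = n.natAbs) (hg : g = Nat.gcd m b) :
    pvC n base (b / g) = 0 := by
  have hgb : g ∣ b := hg ▸ Nat.gcd_dvd_right _ _
  have hgm : g ∣ m := hg ▸ Nat.gcd_dvd_left _ _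
  have hnat : b ∣ (b / g) * m := by
    have h1 : (b / g) * m = b * (m / g) := by
      conv_lhs => rw [← Nat.mul_div_cancel' hgm]
      rw [← Nat.mul_assoc, Nat.div_mul_cancel hgb]
    exact h1 ▸ Dvd.intro _ rfl
  have hdvd : base ∣ ((b / g : Nat) : Int) * n :=
    Int.natAbs_dvd_natAbs.mp (by simpa [Int.natAbs_mul, hb, hm] using hnat)
  unfold pvC
  exact Int.emod_eq_zero_of_dvd hdvd

-- running A's loop from position L-j with the first L-j values collected yields pvF L
theorem pvGoA_run (n base : Int) (b L : Nat) (hb : base = (b : Int)) (hL1 : 1 ≤ L)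
    (hLb : L ≤ b)
    (hnm : ∀ i < L, pvC n base i ∉ pvF n base i)
    (hzero : pvC n base L = 0) :
    ∀ j, j ≤ L →
      pvGoA n base (b - (L - j)) (pvF n base (L - j)) (pvC n base (L - j)) =
        pvF n base L := by
  intro j
  induction j with
  | zero =>
    intro _
    simp only [Nat.sub_zero]
    rcases Nat.eq_or_lt_of_le hLb with hEq | hLt
    · rw [hEq, Nat.sub_self]
      rfl
    · rw [show b - L = (b - L - 1) + 1 from by omega]
      rw [pvGoA, if_pos]
      rw [hzero]
      simp only [pvF, List.mem_map, List.mem_range]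
      exact ⟨0, hL1, pvC_zero n base⟩
  | succ j ih =>
    intro hj
    set i := L - (j + 1) with hidef
    have hiL : i < L := by omega
    rw [show b - i = (b - (i + 1)) + 1 from by omega]
    rw [pvGoA, if_neg (hnm i hiL)]
    have hmodeq : PySem.Int.mod (pvC n base i + n) base = pvC n base (i + 1) := by
      rw [PySem.Int.mod_eq_emod_of_pos (by rw [hb]; exact_mod_cast Nat.lt_of_lt_of_le hL1 hLb)]
      exact pvC_step n base i
    rw [hmodeq, ← pvF_succ]
    have hi1 : i + 1 = L - j := by omega
    rw [hi1]
    exact ih (by omega)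

-- ===== VERDICT (by name: the statement is the Claim_ definition above) =====
theorem find_all_possible_transforms_spec : Claim_equal_find_all_possible_transforms := by
  intro n base _
  unfold Spec_find_all_possible_transforms find_all_possible_transforms find_all_possible_transforms_alt
  by_cases hble : base ≤ 0
  · rw [if_pos hble, show base.toNat = 0 from by omega]
    rfl
  · rw [if_neg hble]
    have hblt : 0 < base := by omega
    set b := base.toNat with hbdef
    have hb : base = (b : Int) := by omega
    have hbpos : 0 < b := by omega
    set m := n.natAbs with hmdef
    set g := Nat.gcd m b with hgdef
    have hgpos : 0 < g := Nat.gcd_pos_of_pos_right _ hbpos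
    have hgleb : g ≤ b := Nat.le_of_dvd hbpos (Nat.gcd_dvd_right _ _)
    set L := b / g with hLdef
    have hL1 : 1 ≤ L := Nat.div_pos hgleb hgpos
    have hLb : L ≤ b := Nat.div_le_self _ _
    -- B's side equals pvF n base L
    have hgcdB : pvGcdB n.natAbs base.natAbs = g := by
      rw [pvGcdB_eq_gcd, show base.natAbs = b from by omega, Nat.gcd_comm]
    have hfd : PySem.Int.floordiv base ((g : Nat) : Int) = (L : Int) := by
      rw [hb]
      exact_mod_cast PySem.Int.floordiv_natCast b g
    have hBside :
        (PySem.List.pyRange 0 ((L : Nat) : Int) 1).map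
            (fun i => PySem.Int.mod (i * n) base) = pvF n base L := by
      rw [PySem.List.pyRange_one, List.map_map]
      have hlen : (((L : Nat) : Int) - 0).toNat = L := by omega
      rw [hlen]
      apply List.map_congr_left
      intro k hk
      simp only [Function.comp_apply, zero_add]
      rw [PySem.Int.mod_eq_emod_of_pos (by omega)]
      rfl
    -- A's side
    have hA := pvGoA_run n base b L hb hL1 hLb
      (fun i hi => pvC_not_mem n base b m g hb hbpos hmdef hgdef (hLdef ▸ hi))
      (hLdef ▸ pvC_L n base b m g hb hmdef hgdef)
      L le_rfl
    rw [Nat.sub_self, Nat.sub_zero] at hA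
    have hstart : pvF n base 0 = [] := by simp [pvF]
    rw [hstart, pvC_zero] at hA
    show pvGoA n base b [] 0 =
      (PySem.List.pyRange 0
          (PySem.Int.floordiv base ((pvGcdB n.natAbs base.natAbs : Nat) : Int)) 1).map
        (fun i => PySem.Int.mod (i * n) base)
    rw [hgcdB, hfd, hBside]
    exact hA
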